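-- pv_equiv track=rewrite | github.com/2018007956/Algorithm | Neul-bo/64064.py | solution
-- ===== SOURCE A (Python) =====
-- def solution(user_id, banned_id):
--     def isSame(user, ban):
--         if len(user)!=len(ban):
--             return False
--
--         for i in range(len(user)):
--             if ban[i]=='*':
--                 continue
--             else:
--                 if user[i]!=ban[i]:
--                     return False
--         return True
--
--     match = {i: [] for i in range(len(banned_id))}
--
--     for i, ban in enumerate(banned_id):
--         for user in user_id:
--             if isSame(user, ban):
--                 match[i].append(user)
--
--     answer = []
--     def dfs(a, i): # a : 현재까지 선택된 사용자 리스트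
--         if i == len(banned_id):
--             answer.append(a)
--             return
--
--         # match[i] : i번째 banned_id에 매칭될 수 있는 user_id 리스트
--         for user in match[i]:
--             if user not in a:
--                 dfs(a+[user], i+1)
--
--     dfs([], 0)
--
--     return len(set(map(tuple, map(sorted, answer))))
-- ===== SOURCE B (Python) =====
-- def solution(user_id, banned_id):
--     def is_match(user, ban):
--         return len(user) == len(ban) and all(b == '*' or u == b for u, b in zip(user, ban))
--
--     match = [[u for u in user_id if is_match(u, ban)] for ban in banned_id]
--
--     # breadth-first iterative cartesian product of the match lists,
--     # pruning combinations that would reuse a user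
--     combos = [()]
--     for m in match:
--         combos = [c + (u,) for c in combos for u in m if u not in c]
--
--     result = set()
--     for combo in combos:
--         result.add(frozenset(combo))
--     return len(result)
-- ===== Notes on version B (the rewrite author's own statement) =====
-- stated objective: alternative
-- what changed: Replaces A's recursive DFS over a growing chosen-users list (with a global answer list deduped at the end via sorted tuples) by an iteratively built cartesian product of the per-pattern match lists, filtered for all-distinct combinations and deduped on the fly as frozensets.
import Mathlib
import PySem

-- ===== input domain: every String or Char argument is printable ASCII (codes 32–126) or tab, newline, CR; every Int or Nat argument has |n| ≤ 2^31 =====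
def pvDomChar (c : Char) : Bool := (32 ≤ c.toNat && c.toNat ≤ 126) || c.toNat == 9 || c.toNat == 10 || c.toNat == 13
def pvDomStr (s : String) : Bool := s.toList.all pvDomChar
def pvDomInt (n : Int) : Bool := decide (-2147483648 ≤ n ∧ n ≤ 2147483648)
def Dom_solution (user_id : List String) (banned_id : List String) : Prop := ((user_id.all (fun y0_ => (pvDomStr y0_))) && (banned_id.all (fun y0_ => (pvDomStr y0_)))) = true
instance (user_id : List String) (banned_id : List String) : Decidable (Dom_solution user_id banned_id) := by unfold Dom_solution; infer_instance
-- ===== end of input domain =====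

-- B replaces A's recursive DFS over a growing chosen-users list by an iterated cartesian
-- product of the per-pattern match lists, filtered for distinctness and deduped as frozensets
-- (objective: alternative decomposition, same asymptotic cost).

-- ===== PORT A =====

-- the index loop of isSame, walking both character lists in step (lengths already equal)
def isSameLoop : List Char → List Char → Bool
  | [], _ => true
  | _ :: _, [] => true
  | u :: us, b :: bs => if b = '*' then isSameLoop us bs else if u ≠ b then false else isSameLoop us bs

def isSame (user ban : String) : Bool :=
  if PySem.Str.len user ≠ PySem.Str.len ban then false
  else isSameLoop user.toList ban.toList

-- dfs(a, i): recursion over the remaining match lists (match[i], match[i+1], …)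
def dfsA : List String → List (List String) → List (List String)
  | a, [] => [a]
  | a, m :: ms =>
      m.foldl (fun acc user => if a.contains user then acc else acc ++ dfsA (a ++ [user]) ms) []

def solution (user_id : List String) (banned_id : List String) : Int :=
  -- match = {i: []}; for i, ban in enumerate(banned_id): for user in user_id: append —
  -- the dict is keyed by consecutive 0..n-1, ported as the list of its value lists in key order
  let matchLists : List (List String) :=
    banned_id.foldl (fun acc ban =>
      acc ++ [user_id.foldl (fun l user => if isSame user ban then l ++ [user] else l) []]) []
  let answer := dfsA [] matchLists
  ((PySem.Set.ofList (answer.map (fun a => PySem.List.sorted a (fun x => x) false))).length : Int)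

-- ===== PORT B =====

def isMatch (user ban : String) : Bool :=
  (PySem.Str.len user == PySem.Str.len ban) &&
    (user.toList.zip ban.toList).all (fun p => p.2 == '*' || p.1 == p.2)

def solution_alt (user_id : List String) (banned_id : List String) : Int :=
  let matchLists : List (List String) :=
    banned_id.map (fun ban => user_id.filter (fun u => isMatch u ban))
  -- combos = [()]; for m in match: combos = [c + (u,) for c in combos for u in m if u not in c]
  let combos : List (List String) :=
    matchLists.foldl (fun cs m =>
      cs.flatMap (fun c => (m.filter (fun u => !c.contains u)).map (fun u => c ++ [u]))) [[]]
  -- result = set(); add frozenset(combo) for each combo.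
  -- frozenset(combo) is PySem.Set.ofList combo; a set OF frozensets is ported by hand as a
  -- list deduped under Set.equal (exact: only its length is returned, which is order-free).
  let result : List (PySem.Set String) :=
    combos.foldl (fun res c =>
      if res.any (fun t => PySem.Set.equal t (PySem.Set.ofList c)) then res
      else res ++ [PySem.Set.ofList c]) []
  (result.length : Int)

-- ===== PRECONDITION & SPEC =====
def Spec_solution (user_id : List String) (banned_id : List String) (out : Int) : Prop := out = solution_alt user_id banned_id
instance (user_id : List String) (banned_id : List String) (out : Int) : Decidable (Spec_solution user_id banned_id out) := by unfold Spec_solution; infer_instance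

-- ===== CLAIM (what is proved, stated in full; the proofs are below) =====
def Claim_equal_solution : Prop := ∀ (user_id : List String) (banned_id : List String), Dom_solution user_id banned_id → Spec_solution user_id banned_id (solution user_id banned_id)

-- ===== LEMMAS AND PROOFS =====

-- right-nested cartesian product of the match lists
def prodR : List (List String) → List (List String)
  | [] => [[]]
  | m :: ms => m.flatMap (fun u => (prodR ms).map (u :: ·))

-- the stepwise "user not in a" test dfs applies along a combo
def noRep : List String → List String → Bool
  | _, [] => true
  | a, u :: c => !a.contains u && noRep (a ++ [u]) c

def sortedId (c : List String) : List String := PySem.List.sorted c (fun x => x) false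

theorem isSameLoop_eq_zip_all (us bs : List Char) (h : us.length = bs.length) :
    isSameLoop us bs = (us.zip bs).all (fun p => p.2 == '*' || p.1 == p.2) := by
  induction us generalizing bs with
  | nil => cases bs with
    | nil => rfl
    | cons b bs => simp at h
  | cons u us ih =>
    cases bs with
    | nil => simp at h
    | cons b bs =>
      simp only [isSameLoop, List.zip_cons_cons, List.all_cons]
      rw [ih bs (by simpa using h)]
      by_cases hb : b = '*'
      · simp [hb]
      · by_cases hu : u = b <;> simp [hb, hu]

theorem isSame_eq_isMatch (u b : String) : isSame u b = isMatch u b := by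
  unfold isSame isMatch
  by_cases h : u.toList.length = b.toList.length
  · rw [if_neg (by simp [h]), isSameLoop_eq_zip_all _ _ h]
    have : (PySem.Str.len u == PySem.Str.len b) = true := by simp [h]
    rw [this, Bool.true_and]
  · rw [if_pos (by simp; exact_mod_cast h)]
    have : (PySem.Str.len u == PySem.Str.len b) = false := by
      simp; exact_mod_cast h
    rw [this, Bool.false_and]

-- comprehension shape: flatMap over a filtered list, as a flatMap with a guard
theorem flatMap_filter_ite {α β : Type} (m : List α) (p : α → Bool) (g : α → List β) :
    (m.filter p).flatMap g = m.flatMap (fun u => if p u then g u else []) := by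
  induction m with
  | nil => rfl
  | cons u m ih =>
    by_cases h : p u <;> simp [h, ih]

theorem combos_foldl (ms : List (List String)) (cs : List (List String)) :
    ms.foldl (fun cs m =>
        cs.flatMap (fun c => (m.filter (fun u => !c.contains u)).map (fun u => c ++ [u]))) cs
      = cs.flatMap (fun c => ((prodR ms).filter (noRep c)).map (c ++ ·)) := by
  induction ms generalizing cs with
  | nil => simp [prodR, noRep]
  | cons m ms ih =>
    rw [List.foldl_cons, ih]
    simp only [List.flatMap_assoc, List.flatMap_map]
    refine List.flatMap_congr (fun c _ => ?_)
    rw [flatMap_filter_ite, prodR, List.filter_flatMap, List.map_flatMap]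
    refine List.flatMap_congr (fun u _ => ?_)
    rw [List.filter_map]
    by_cases h : u ∈ c
    · have : (noRep c ∘ fun t => u :: t) = fun _ => false := by
        funext t; simp [Function.comp, noRep, h]
      simp [h, this]
    · have : (noRep c ∘ fun t => u :: t) = noRep (c ++ [u]) := by
        funext t; simp [Function.comp, noRep, h]
      rw [if_pos (by simp [h]), this, List.map_map]
      refine List.map_congr_left (fun t _ => ?_)
      simp [Function.comp]

theorem dfsA_eq (ms : List (List String)) (a : List String) :
    dfsA a ms = ((prodR ms).filter (noRep a)).map (a ++ ·) := by
  induction ms generalizing a with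
  | nil => simp [dfsA, prodR, noRep]
  | cons m ms ih =>
    rw [dfsA]
    have hfun : (fun (acc : List (List String)) user =>
          if a.contains user then acc else acc ++ dfsA (a ++ [user]) ms)
        = (fun acc user => acc ++ (if a.contains user then [] else dfsA (a ++ [user]) ms)) := by
      funext acc u; by_cases h : u ∈ a <;> simp [h]
    rw [hfun, PySem.List.foldl_append_eq_flatMap, prodR, List.filter_flatMap, List.map_flatMap]
    rw [List.nil_append]
    refine List.flatMap_congr (fun u _ => ?_)
    rw [List.filter_map]
    by_cases h : u ∈ a
    · have : (noRep a ∘ fun t => u :: t) = fun _ => false := by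
        funext t; simp [Function.comp, noRep, h]
      simp [h, this]
    · have : (noRep a ∘ fun t => u :: t) = noRep (a ++ [u]) := by
        funext t; simp [Function.comp, noRep, h]
      rw [if_neg (by simp [h]), this, ih, List.map_map]
      refine List.map_congr_left (fun t _ => ?_)
      simp [Function.comp]

theorem noRep_iff (c a : List String) (ha : a.Nodup) :
    noRep a c = true ↔ (a ++ c).Nodup := by
  induction c generalizing a with
  | nil => simpa [noRep]
  | cons u c ih =>
    by_cases h : u ∈ a
    · constructor
      · intro hr; exfalso; simp [noRep, h] at hr
      · intro hn; exfalso
        exact List.disjoint_of_nodup_append hn h (by simp)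
    · have ha' : (a ++ [u]).Nodup := by
        simp [List.nodup_append, ha]
        exact fun a' ha' he => h (he ▸ ha')
      rw [show noRep a (u :: c) = noRep (a ++ [u]) c by simp [noRep, h]]
      rw [ih (a ++ [u]) ha']
      simp

theorem equal_iff_sorted (c d : List String) (hc : c.Nodup) (hd : d.Nodup) :
    PySem.Set.equal (PySem.Set.ofList c) (PySem.Set.ofList d) = true ↔ sortedId c = sortedId d := by
  rw [PySem.Set.equal_iff]
  unfold sortedId
  rw [PySem.List.sorted_id_eq_sorted_id_iff_perm]
  rw [List.perm_ext_iff_of_nodup hc hd]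
  constructor
  · intro h x
    have := h x
    rw [PySem.Set.mem_ofList, PySem.Set.mem_ofList] at this
    exact this
  · intro h x
    rw [PySem.Set.mem_ofList, PySem.Set.mem_ofList]
    exact h x

theorem count_fold (xs : List (List String)) (hx : ∀ c ∈ xs, c.Nodup)
    (accA : List (List String)) (accB : List (PySem.Set String))
    (hlen : accA.length = accB.length)
    (hcorr : ∀ c, c.Nodup → (sortedId c ∈ accA ↔ accB.any (fun t => PySem.Set.equal t (PySem.Set.ofList c)) = true)) :
    (xs.foldl (fun s c => PySem.Set.add s (sortedId c)) accA).length
      = (xs.foldl (fun res c =>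
          if res.any (fun t => PySem.Set.equal t (PySem.Set.ofList c)) then res
          else res ++ [PySem.Set.ofList c]) accB).length := by
  induction xs generalizing accA accB with
  | nil => simpa using hlen
  | cons c xs ih =>
    have hc : c.Nodup := hx c (by simp)
    have hcor := hcorr c hc
    simp only [List.foldl_cons]
    by_cases h : sortedId c ∈ accA
    · rw [PySem.Set.add_of_mem h, if_pos (hcor.1 h)]
      exact ih (fun d hd => hx d (by simp [hd])) accA accB hlen hcorr
    · rw [PySem.Set.add_of_not_mem h,
        if_neg (by intro hb; exact h (hcor.2 hb))]
      refine ih (fun d hd => hx d (by simp [hd])) _ _ (by simp [hlen]) ?_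
      intro d hd
      rw [List.mem_append, List.any_append]
      simp only [List.mem_singleton, List.any_cons, List.any_nil, Bool.or_false]
      rw [hcorr d hd]
      constructor
      · rintro (hb | he)
        · simp [hb]
        · have h1 : sortedId c = sortedId d := he.symm
          have h2 := (equal_iff_sorted c d hc hd).2 h1
          simp [h2]
      · intro hb
        rcases Bool.or_eq_true_iff.1 hb with hb | he
        · exact Or.inl hb
        · exact Or.inr ((equal_iff_sorted c d hc hd).1 he).symm

theorem matchLists_eq (user_id banned_id : List String) :
    banned_id.foldl (fun acc ban =>
      acc ++ [user_id.foldl (fun l user => if isSame user ban then l ++ [user] else l) []]) []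
    = banned_id.map (fun ban => user_id.filter (fun u => isMatch u ban)) := by
  rw [PySem.List.foldl_append_singleton_eq_map, List.nil_append]
  refine List.map_congr_left (fun ban _ => ?_)
  have hfun : (fun (l : List String) user => if isSame user ban then l ++ [user] else l)
      = (fun l user => if isMatch user ban then l ++ [user] else l) := by
    funext l u; rw [isSame_eq_isMatch]
  rw [hfun, PySem.List.foldl_append_if_eq_filter, List.nil_append]

-- ===== VERDICT (by name: the statement is the Claim_ definition above) =====
theorem solution_spec : Claim_equal_solution := by
  intro user_id banned_id _
  unfold Spec_solution
  show solution user_id banned_id = solution_alt user_id banned_id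
  unfold solution solution_alt
  dsimp only
  rw [matchLists_eq, combos_foldl, dfsA_eq]
  simp only [List.flatMap_cons, List.flatMap_nil, List.append_nil, List.nil_append]
  simp only [List.map_id']
  congr 1
  rw [show (fun a : List String => PySem.List.sorted a (fun x => x) false) = sortedId from rfl]
  rw [PySem.Set.ofList_eq_foldl, List.foldl_map]
  refine count_fold _ ?_ [] [] rfl (by simp)
  intro c hcmem
  have := (List.mem_filter.1 hcmem).2
  simpa using (noRep_iff c [] List.nodup_nil).1 this
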